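-- pv_equiv track=rewrite | github.com/Manish787852/Vega-scraper | scraper.py | prefer_links
-- ===== SOURCE A (Python) =====
-- HOST_PRIORITY = ["gdtot", "gdflix", "hubcloud", "v-cloud", "drive.google", "gdrive", "gdlink"]
--
-- def prefer_links(links):
--     """Sort links by HOST_PRIORITY (links earlier in list are preferred)."""
--     def score(h):
--         low = h.lower()
--         for idx, host in enumerate(HOST_PRIORITY):
--             if host in low:
--                 return idx
--         return len(HOST_PRIORITY)
--     return sorted(links, key=lambda x: score(x))
-- ===== SOURCE B (Python) =====
-- HOST_PRIORITY = ["gdtot", "gdflix", "hubcloud", "v-cloud", "drive.google", "gdrive", "gdlink"]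
--
-- def prefer_links(links):
--     """Bucket links by first matching HOST_PRIORITY host (no-match last), keeping input order."""
--     n = len(HOST_PRIORITY)
--     buckets = [[] for _ in range(n + 1)]
--     for link in links:
--         low = link.lower()
--         idx = next((i for i, h in enumerate(HOST_PRIORITY) if h in low), n)
--         buckets[idx].append(link)
--     out = []
--     for b in buckets:
--         out += b
--     return out
-- ===== Notes on version B (the rewrite author's own statement) =====
-- stated objective: alternative
-- what changed: Replaces the comparison sort keyed by priority score with a single-pass bucket distribution into len(HOST_PRIORITY)+1 buckets concatenated in priority order, preserving stable order within each bucket.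
import Mathlib
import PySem

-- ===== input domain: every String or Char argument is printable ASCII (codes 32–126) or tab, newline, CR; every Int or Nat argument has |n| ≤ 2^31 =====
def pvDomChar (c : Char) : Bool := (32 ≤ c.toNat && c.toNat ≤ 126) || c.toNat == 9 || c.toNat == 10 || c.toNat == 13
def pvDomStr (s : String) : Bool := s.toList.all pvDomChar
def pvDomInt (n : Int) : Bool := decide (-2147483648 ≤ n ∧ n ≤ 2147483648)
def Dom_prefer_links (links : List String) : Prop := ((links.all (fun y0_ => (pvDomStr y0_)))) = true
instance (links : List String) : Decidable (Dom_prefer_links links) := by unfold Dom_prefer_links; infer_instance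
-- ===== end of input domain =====

-- B replaces the comparison sort by a single-pass bucket distribution over the 8 priority
-- classes, concatenated in priority order (objective: alternative; same observable result).

def HOST_PRIORITY : List String :=
  ["gdtot", "gdflix", "hubcloud", "v-cloud", "drive.google", "gdrive", "gdlink"]

-- ===== PORT A =====
-- the 'for idx, host in enumerate(HOST_PRIORITY): if host in low: return idx' loop
def scoreLoop (low : String) (idx : Int) : List String → Int
  | [] => (HOST_PRIORITY.length : Int)
  | host :: rest => if PySem.Str.isIn host low then idx else scoreLoop low (idx + 1) rest

def score (h : String) : Int := scoreLoop (PySem.Str.lower h) 0 HOST_PRIORITY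

def prefer_links (links : List String) : List String :=
  PySem.List.sorted links (fun x => score x) false

-- ===== PORT B =====
-- idx = next((i for i, h in enumerate(HOST_PRIORITY) if h in low), n)
-- (List.findIdx returns the list's length when nothing matches, exactly the default n)
def altIdx (link : String) : Nat :=
  List.findIdx (fun host => PySem.Str.isIn host (PySem.Str.lower link)) HOST_PRIORITY

def prefer_links_alt (links : List String) : List String :=
  let n := HOST_PRIORITY.length
  let buckets := links.foldl
    (fun bs link => bs.modify (altIdx link) (fun b => b ++ [link]))
    (List.replicate (n + 1) [])
  buckets.foldl (fun out b => out ++ b) []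

-- ===== PRECONDITION & SPEC =====
def Spec_prefer_links (links : List String) (out : List String) : Prop := out = prefer_links_alt links
instance (links : List String) (out : List String) : Decidable (Spec_prefer_links links out) := by unfold Spec_prefer_links; infer_instance

-- ===== CLAIM (what is proved, stated in full; the proofs are below) =====
def Claim_equal_prefer_links : Prop := ∀ (links : List String), Dom_prefer_links links → Spec_prefer_links links (prefer_links links)

-- ===== LEMMAS AND PROOFS =====

theorem insertBy_cons {α : Type} (before : α → α → Bool) (x y : α) (ys : List α) :
    PySem.List.insertBy before x (y :: ys) =
      if before x y then x :: y :: ys else y :: PySem.List.insertBy before x ys := rfl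

theorem insertBy_append_not_before {α : Type} (before : α → α → Bool) (x : α)
    (p s : List α) (hp : ∀ y ∈ p, before x y = false) :
    PySem.List.insertBy before x (p ++ s) = p ++ PySem.List.insertBy before x s := by
  induction p with
  | nil => simp
  | cons y ys ih =>
    have hy : before x y = false := hp y (by simp)
    simp [insertBy_cons, hy, ih (fun z hz => hp z (by simp [hz]))]

theorem insertBy_all_before {α : Type} (before : α → α → Bool) (x : α)
    (s : List α) (hs : ∀ y ∈ s, before x y = true) :
    PySem.List.insertBy before x s = x :: s := by
  cases s with
  | nil => rfl
  | cons y ys => simp [insertBy_cons, hs y (by simp)]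

-- the heart: inserting x into the concatenated key-buckets appends it to its own bucket
theorem insertBy_flatMap_range {α : Type} (key : α → Int) (x : α) (n : Nat)
    (xs : List α) (hx0 : 0 ≤ key x) (hxn : key x < (n : Int)) :
    PySem.List.insertBy (fun a b => decide (key a < key b)) x
      ((List.range n).flatMap (fun (k : Nat) => xs.filter (fun y => key y == (k : Int))))
    = (List.range n).flatMap
        (fun (k : Nat) => xs.filter (fun y => key y == (k : Int)) ++
          if (k : Int) == key x then [x] else []) := by
  set f : Nat → List α := fun k => xs.filter (fun y => key y == (k : Int)) with hf
  set f' : Nat → List α :=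
    fun k => xs.filter (fun y => key y == (k : Int)) ++ if (k : Int) == key x then [x] else []
    with hf'
  set m : Nat := (key x).toNat with hm
  have hkx : (m : Int) = key x := Int.toNat_of_nonneg hx0
  obtain ⟨d, rfl⟩ : ∃ d, n = (m + 1) + d := ⟨n - (m + 1), by omega⟩
  have hsplit : List.range (m + 1 + d) =
      (List.range m ++ [m]) ++ (List.range d).map (fun j => (m + 1) + j) := by
    rw [List.range_add (n := m + 1) (m := d)]
    congr 1
    simpa using List.range_add (n := m) (m := 1)
  rw [hsplit]
  simp only [List.flatMap_append, List.flatMap_cons, List.flatMap_nil, List.flatMap_map,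
    List.append_nil]
  have hfe : ∀ k : Nat, k ≠ m → f' k = f k := by
    intro k hk
    simp only [hf', hf]
    rw [if_neg (by simp only [beq_iff_eq]; omega), List.append_nil]
  have e1 : List.flatMap f' (List.range m) = List.flatMap f (List.range m) :=
    List.flatMap_congr (fun k hk => hfe k (by simp only [List.mem_range] at hk; omega))
  have e2 : List.flatMap (fun j => f' (m + 1 + j)) (List.range d)
      = List.flatMap (fun j => f (m + 1 + j)) (List.range d) :=
    List.flatMap_congr (fun j _ => hfe (m + 1 + j) (by omega))
  have e3 : f' m = f m ++ [x] := by
    simp only [hf', hf]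
    rw [if_pos (by simp [hkx])]
  rw [e1, e2, e3]
  rw [insertBy_append_not_before]
  · rw [insertBy_all_before]
    · simp [List.append_assoc]
    · intro y hy
      simp only [hf, List.mem_flatMap, List.mem_filter, List.mem_range, beq_iff_eq] at hy
      obtain ⟨j, hj, _, hky⟩ := hy
      simp only [decide_eq_true_eq, hky]
      push_cast
      omega
  · intro y hy
    simp only [hf, List.mem_append, List.mem_flatMap, List.mem_filter, List.mem_range,
      beq_iff_eq] at hy
    have hky : ∃ k : Nat, k ≤ m ∧ key y = (k : Int) := by
      rcases hy with ⟨k, hk, _, hky⟩ | ⟨_, hky⟩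
      exacts [⟨k, by omega, hky⟩, ⟨m, le_refl m, hky⟩]
    obtain ⟨k, hk, hky⟩ := hky
    simp only [decide_eq_false_iff_not, hky, not_lt]
    omega

-- stable sort by a bounded Int key is the concatenation of the key-buckets
theorem sorted_eq_buckets {α : Type} (xs : List α) (key : α → Int) (n : Nat)
    (h : ∀ x ∈ xs, 0 ≤ key x ∧ key x < (n : Int)) :
    PySem.List.sorted xs key false =
      (List.range n).flatMap (fun (k : Nat) => xs.filter (fun y => key y == (k : Int))) := by
  induction xs using List.reverseRecOn with
  | nil => simp [PySem.List.sorted_eq_foldl_insertBy]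
  | append_singleton xs x ih =>
    rw [PySem.List.sorted_eq_foldl_insertBy, List.foldl_append, List.foldl_cons, List.foldl_nil,
        ← PySem.List.sorted_eq_foldl_insertBy,
        ih (fun y hy => h y (by simp [hy]))]
    obtain ⟨hx0, hxn⟩ := h x (by simp)
    rw [insertBy_flatMap_range key x n xs hx0 hxn]
    apply List.flatMap_congr
    intro k _
    rw [List.filter_append]
    congr 1
    simp only [List.filter_cons, List.filter_nil]
    by_cases hc : key x = (k : Int)
    · rw [if_pos (by simp [hc]), if_pos (by simp [hc])]
    · rw [if_neg (by simp only [beq_iff_eq]; exact fun h => hc h.symm),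
          if_neg (by simp [beq_iff_eq, hc])]

-- A's score equals B's bucket index (cast to Int)
theorem score_eq_altIdx (h : String) : score h = (altIdx h : Int) := by
  simp only [score, altIdx, HOST_PRIORITY, scoreLoop, List.findIdx_cons, Bool.cond_eq_ite]
  split_ifs <;> norm_num

theorem altIdx_lt (h : String) : altIdx h < 8 := by
  have := List.findIdx_le_length (p := fun host => PySem.Str.isIn host (PySem.Str.lower h))
    (xs := HOST_PRIORITY)
  have hlen : HOST_PRIORITY.length = 7 := rfl
  simp only [altIdx]; omega

-- the distribution loop, characterised pointwise
theorem foldl_buckets (links : List String) (acc : List (List String))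
    (h : ∀ link ∈ links, altIdx link < acc.length) :
    links.foldl (fun bs link => bs.modify (altIdx link) (fun b => b ++ [link])) acc
      = (List.range acc.length).map
          (fun k => acc[k]! ++ links.filter (fun x => altIdx x == k)) := by
  induction links generalizing acc with
  | nil =>
    apply List.ext_getElem (by simp)
    intro i h1 h2
    simp at h2
    simp [h2]
  | cons l ls ih =>
    simp only [List.foldl_cons]
    rw [ih _ (fun x hx => by rw [List.length_modify]; exact h x (by simp [hx]))]
    have hlen : (acc.modify (altIdx l) (fun b => b ++ [l])).length = acc.length :=
      List.length_modify ..
    rw [hlen]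
    apply List.map_congr_left
    intro k hk
    simp only [List.mem_range] at hk
    have hget : (acc.modify (altIdx l) (fun b => b ++ [l]))[k]! =
        if altIdx l = k then acc[k]! ++ [l] else acc[k]! := by
      rw [getElem!_pos _ k (by omega), getElem!_pos _ k hk, List.getElem_modify]
    rw [hget, List.filter_cons]
    by_cases hc : altIdx l = k <;> simp [hc]

theorem foldl_append_eq_flatten {α : Type} (bs : List (List α)) (a : List α) :
    bs.foldl (fun out b => out ++ b) a = a ++ bs.flatten := by
  induction bs generalizing a with
  | nil => simp
  | cons b bs ih => simp [ih, List.append_assoc]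

-- ===== VERDICT (by name: the statement is the Claim_ definition above) =====
theorem prefer_links_spec : Claim_equal_prefer_links := by
  intro links _
  unfold Spec_prefer_links prefer_links prefer_links_alt
  dsimp only
  have hb : ∀ x ∈ links, 0 ≤ score x ∧ score x < ((8 : Nat) : Int) := by
    intro x _
    rw [score_eq_altIdx]
    have := altIdx_lt x
    constructor <;> [positivity; exact_mod_cast this]
  rw [sorted_eq_buckets links (fun x => score x) 8 hb]
  rw [foldl_buckets links _ (fun l _ => by
      have h := altIdx_lt l
      have h7 : HOST_PRIORITY.length = 7 := rfl
      simp only [List.length_replicate]; omega)]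
  rw [foldl_append_eq_flatten, List.nil_append, ← List.flatMap_def]
  have h7 : HOST_PRIORITY.length = 7 := rfl
  rw [List.length_replicate, h7]
  apply List.flatMap_congr
  intro k hk
  simp only [List.mem_range] at hk
  rw [getElem!_pos _ k (by simpa using hk), List.getElem_replicate, List.nil_append]
  apply List.filter_congr
  intro x _
  rw [score_eq_altIdx]
  simp
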